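-- pv_equiv track=rewrite | github.com/unthingable/ripcord | benchmark/scripts/sweep.py | generate_grid_combos
-- ===== SOURCE A (Python) =====
-- import itertools
--
-- def generate_grid_combos(best_per_param, top_n=2):
--     """Generate focused grid from top-N values per parameter."""
--     param_values = {}
--     for param_name, ranked_values in best_per_param.items():
--         param_values[param_name] = ranked_values[:top_n]
--
--     combos = []
--     keys = sorted(param_values.keys())
--     for vals in itertools.product(*(param_values[k] for k in keys)):
--         params = dict(zip(keys, vals))
--         combos.append(params)
--     return combos
-- ===== SOURCE B (Python) =====
-- def generate_grid_combos(best_per_param, top_n=2):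
--     """Generate focused grid from top-N values per parameter.
--
--     Mixed-radix enumeration: there are prod(len(values)) combos over the
--     sorted keys; combo #i is computed directly by decoding the index i
--     digit by digit (each digit selects one value for one key), instead of
--     building partial products incrementally."""
--     keys = sorted(best_per_param)
--     pairs = [(k, best_per_param[k][:top_n]) for k in keys]
--
--     def num_combos(ps):
--         n = 1
--         for _, vs in ps:
--             n *= len(vs)
--         return n
--
--     def decode(ps, i):
--         if not ps:
--             return {}
--         (k, vs), rest = ps[0], ps[1:]
--         s = num_combos(rest)
--         combo = {k: vs[i // s]}
--         combo.update(decode(rest, i % s))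
--         return combo
--
--     return [decode(pairs, i) for i in range(num_combos(pairs))]
-- ===== Notes on version B (the rewrite author's own statement) =====
-- stated objective: alternative
-- what changed: Replaces the incremental itertools.product enumeration by mixed-radix index decoding: B computes the total combo count as a product of list lengths and constructs combo #i directly from the index i via repeated divmod, instead of extending partial value tuples.
import Mathlib
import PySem

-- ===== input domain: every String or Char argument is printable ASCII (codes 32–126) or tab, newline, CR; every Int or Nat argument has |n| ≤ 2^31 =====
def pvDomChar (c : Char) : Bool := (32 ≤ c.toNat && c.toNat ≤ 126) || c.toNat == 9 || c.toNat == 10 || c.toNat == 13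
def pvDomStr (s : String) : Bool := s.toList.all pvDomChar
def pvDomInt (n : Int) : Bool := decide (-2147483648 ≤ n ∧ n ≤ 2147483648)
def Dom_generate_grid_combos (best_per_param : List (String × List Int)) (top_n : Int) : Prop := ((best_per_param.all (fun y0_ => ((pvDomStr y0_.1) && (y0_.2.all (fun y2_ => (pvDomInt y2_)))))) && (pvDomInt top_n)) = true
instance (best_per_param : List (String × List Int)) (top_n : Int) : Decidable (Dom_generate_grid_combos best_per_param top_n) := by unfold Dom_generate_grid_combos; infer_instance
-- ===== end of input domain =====

-- B replaces the incremental itertools.product enumeration by mixed-radix index decoding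
-- (combo #i is computed directly from the index i by repeated divmod); same output, different algorithm.

-- ===== PORT A =====
-- itertools.product over a list of value lists, first list outermost (last varies fastest)
def pyProduct : List (List Int) → List (List Int)
  | [] => [[]]
  | l :: ls => l.flatMap (fun v => (pyProduct ls).map (fun t => v :: t))

def generate_grid_combos (best_per_param : List (String × List Int)) (top_n : Int) : List (List (String × Int)) :=
  -- param_values[name] = ranked_values[:top_n]  (dict built by insertion, last duplicate wins)
  let param_values := best_per_param.foldl
    (fun d p => PySem.Dict.insert d p.1 (PySem.List.slice p.2 none (some top_n))) PySem.Dict.empty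
  let keys := PySem.List.sorted (PySem.Dict.keys param_values) (fun k => k) false
  -- for vals in product(*(param_values[k] for k in keys)): combos.append(dict(zip(keys, vals)))
  -- (param_values[k] rendered total as getD; every k ∈ keys is present)
  (pyProduct (keys.map (fun k => PySem.Dict.getD param_values k []))).map (fun vals => keys.zip vals)

-- ===== PORT B =====
-- num_combos(ps): the running product of the value-list lengths
def pvNumCombos (ps : List (String × List Int)) : Int :=
  ps.foldl (fun n p => n * (p.2.length : Int)) 1

-- decode(ps, i): peel off the digit for the first key, recurse on the rest with the remainder.
-- vs[i // s] is in range for every index i the caller enumerates; rendered total with getD 0.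
def pvDecode : List (String × List Int) → Int → List (String × Int)
  | [], _ => []
  | (k, vs) :: rest, i =>
    let s := pvNumCombos rest
    (k, (PySem.List.pyGet? vs (PySem.Int.floordiv i s)).getD 0) :: pvDecode rest (PySem.Int.mod i s)

def generate_grid_combos_alt (best_per_param : List (String × List Int)) (top_n : Int) : List (List (String × Int)) :=
  let d := best_per_param.foldl (fun d p => PySem.Dict.insert d p.1 p.2) PySem.Dict.empty
  let keys := PySem.List.sorted (PySem.Dict.keys d) (fun k => k) false
  let pairs := keys.map (fun k => (k, PySem.List.slice (PySem.Dict.getD d k []) none (some top_n)))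
  (PySem.List.pyRange 0 (pvNumCombos pairs) 1).map (fun i => pvDecode pairs i)

-- ===== PRECONDITION & SPEC =====
def Spec_generate_grid_combos (best_per_param : List (String × List Int)) (top_n : Int) (out : List (List (String × Int))) : Prop := out = generate_grid_combos_alt best_per_param top_n
instance (best_per_param : List (String × List Int)) (top_n : Int) (out : List (List (String × Int))) : Decidable (Spec_generate_grid_combos best_per_param top_n out) := by unfold Spec_generate_grid_combos; infer_instance

-- ===== CLAIM (what is proved, stated in full; the proofs are below) =====
def Claim_equal_generate_grid_combos : Prop := ∀ (best_per_param : List (String × List Int)) (top_n : Int), Dom_generate_grid_combos best_per_param top_n → Spec_generate_grid_combos best_per_param top_n (generate_grid_combos best_per_param top_n)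

-- ===== LEMMAS AND PROOFS =====

-- the two dicts have the same keys
theorem keys_same (bpp : List (String × List Int)) (top_n : Int) :
    PySem.Dict.keys (bpp.foldl (fun d p => PySem.Dict.insert d p.1 (PySem.List.slice p.2 none (some top_n))) PySem.Dict.empty)
      = PySem.Dict.keys (bpp.foldl (fun d p => PySem.Dict.insert d p.1 p.2) PySem.Dict.empty) := by
  rw [PySem.Dict.keys_foldl_insert_key bpp Prod.fst _ PySem.Dict.empty,
      PySem.Dict.keys_foldl_insert_key bpp Prod.fst _ PySem.Dict.empty]

-- A's dict value at any key is the slice of B's dict value there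
theorem getD_rel (bpp : List (String × List Int)) (top_n : Int) (k : String) :
    PySem.Dict.getD (bpp.foldl (fun d p => PySem.Dict.insert d p.1 (PySem.List.slice p.2 none (some top_n))) PySem.Dict.empty) k []
      = PySem.List.slice (PySem.Dict.getD (bpp.foldl (fun d p => PySem.Dict.insert d p.1 p.2) PySem.Dict.empty) k []) none (some top_n) := by
  suffices h : ∀ (dA : PySem.Dict String (List Int)) (dB : PySem.Dict String (List Int)),
      (∀ j, PySem.Dict.getD dA j [] = PySem.List.slice (PySem.Dict.getD dB j []) none (some top_n)) →
      PySem.Dict.getD (bpp.foldl (fun d p => PySem.Dict.insert d p.1 (PySem.List.slice p.2 none (some top_n))) dA) k []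
        = PySem.List.slice (PySem.Dict.getD (bpp.foldl (fun d p => PySem.Dict.insert d p.1 p.2) dB) k []) none (some top_n) by
    apply h
    intro j
    simp [PySem.Dict.getD_empty, PySem.List.slice]
  induction bpp with
  | nil => intro dA dB h; exact h k
  | cons p rest ih =>
    intro dA dB h
    simp only [List.foldl_cons]
    apply ih
    intro j
    rw [PySem.Dict.getD_insert, PySem.Dict.getD_insert]
    split_ifs with hj
    · rfl
    · exact h j

-- pvNumCombos is the product of the value-list lengths (as an Int cast of a Nat product)
theorem numCombos_shift (ps : List (String × List Int)) (c : Int) :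
    ps.foldl (fun n p => n * (p.2.length : Int)) c = c * ps.foldl (fun n p => n * (p.2.length : Int)) 1 := by
  induction ps generalizing c with
  | nil => simp
  | cons p rest ih =>
    simp only [List.foldl_cons]
    rw [ih (c * p.2.length), ih (1 * p.2.length)]
    ring

theorem numCombos_eq_prod (ps : List (String × List Int)) :
    pvNumCombos ps = ((ps.map (fun p => p.2.length)).prod : Int) := by
  induction ps with
  | nil => simp [pvNumCombos]
  | cons p rest ih =>
    unfold pvNumCombos
    simp only [List.foldl_cons]
    rw [numCombos_shift]
    unfold pvNumCombos at ih
    rw [ih, List.map_cons, List.prod_cons]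
    ring

theorem numCombos_cons (k : String) (vs : List Int) (rest : List (String × List Int)) :
    pvNumCombos ((k, vs) :: rest) = (vs.length : Int) * pvNumCombos rest := by
  rw [numCombos_eq_prod, numCombos_eq_prod, List.map_cons, List.prod_cons]

theorem numCombos_nonneg (ps : List (String × List Int)) : 0 ≤ pvNumCombos ps := by
  rw [numCombos_eq_prod]
  apply List.prod_nonneg
  intro x hx
  obtain ⟨p, _, hp⟩ := List.mem_map.mp hx
  omega

-- range of a product splits into a flatMap of blocks
theorem range_mul_flatMap (a b : Nat) :
    List.range (a * b) = (List.range a).flatMap (fun q => (List.range b).map (fun r => q * b + r)) := by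
  induction a with
  | zero => simp
  | succ a ih =>
    rw [Nat.succ_mul, List.range_add, List.range_succ, List.flatMap_append, ih]
    simp

-- a flatMap over a list equals the flatMap over its index range
theorem flatMap_index {β : Type} (vs : List Int) (g : Int → List β) :
    vs.flatMap g = (List.range vs.length).flatMap (fun q => g (vs[q]?.getD 0)) := by
  induction vs with
  | nil => simp
  | cons v rest ih =>
    rw [List.length_cons, List.range_succ_eq_map, List.flatMap_cons, List.flatMap_cons, List.flatMap_map]
    simp only [List.getElem?_cons_zero, Option.getD_some, List.getElem?_cons_succ]
    rw [ih]

-- one unfolding step of pvDecode on a cons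
theorem pvDecode_cons (k : String) (vs : List Int) (rest : List (String × List Int)) (i : Int) :
    pvDecode ((k, vs) :: rest) i
      = (k, (PySem.List.pyGet? vs (PySem.Int.floordiv i (pvNumCombos rest))).getD 0)
          :: pvDecode rest (PySem.Int.mod i (pvNumCombos rest)) := rfl

-- the decode step at index q*b + r, where b is the combo count of the tail
theorem decode_step (k : String) (vs : List Int) (rest : List (String × List Int))
    (q r b : Nat) (hb : pvNumCombos rest = (b : Int)) (hr : r < b) :
    pvDecode ((k, vs) :: rest) ((q * b + r : Nat) : Int)
      = (k, vs[q]?.getD 0) :: pvDecode rest (r : Int) := by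
  have hbpos : 0 < b := by omega
  have hdiv : (q * b + r) / b = q := by
    rw [Nat.mul_comm, Nat.mul_add_div hbpos, Nat.div_eq_of_lt hr]
    omega
  have hmod : (q * b + r) % b = r := by
    rw [Nat.mul_add_mod_self_right, Nat.mod_eq_of_lt hr]
  rw [pvDecode_cons, hb, PySem.Int.floordiv_natCast, PySem.Int.mod_natCast, hdiv, hmod,
      PySem.List.pyGet?_natCast]

-- CORE: the product-then-zip form equals range-then-decode, for any pair list
theorem core (ps : List (String × List Int)) :
    (pyProduct (ps.map Prod.snd)).map (fun vals => (ps.map Prod.fst).zip vals)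
      = (List.range (pvNumCombos ps).toNat).map (fun q : Nat => pvDecode ps (q : Int)) := by
  induction ps with
  | nil =>
    simp [pyProduct, pvNumCombos, pvDecode, List.range_succ]
  | cons p rest ih =>
    obtain ⟨k, vs⟩ := p
    obtain ⟨b, hb⟩ : ∃ b : Nat, pvNumCombos rest = (b : Int) :=
      ⟨(pvNumCombos rest).toNat, (Int.toNat_of_nonneg (numCombos_nonneg rest)).symm⟩
    have hbt : (pvNumCombos rest).toNat = b := by rw [hb]; exact Int.toNat_natCast b
    have hNat : (pvNumCombos ((k, vs) :: rest)).toNat = vs.length * b := by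
      rw [numCombos_cons, hb, ← Int.natCast_mul, Int.toNat_natCast]
    rw [hNat, range_mul_flatMap]
    rw [hbt] at ih
    calc (pyProduct (((k, vs) :: rest).map Prod.snd)).map (fun vals => (((k, vs) :: rest).map Prod.fst).zip vals)
        = vs.flatMap (fun v => (pyProduct (rest.map Prod.snd)).map (fun t => (k, v) :: (rest.map Prod.fst).zip t)) := by
          rw [List.map_cons, List.map_cons]
          show (vs.flatMap (fun v => (pyProduct (rest.map Prod.snd)).map (fun t => v :: t))).map _ = _
          rw [List.map_flatMap]
          apply List.flatMap_congr
          intro v _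
          rw [List.map_map]
          rfl
      _ = vs.flatMap (fun v => ((List.range b).map (fun r : Nat => pvDecode rest (r : Int))).map (fun c => (k, v) :: c)) := by
          apply List.flatMap_congr
          intro v _
          rw [← ih, List.map_map]
          rfl
      _ = (List.range vs.length).flatMap (fun q => ((List.range b).map (fun r : Nat => pvDecode rest (r : Int))).map (fun c => (k, vs[q]?.getD 0) :: c)) :=
          flatMap_index vs _
      _ = (List.range vs.length).flatMap (fun q => (List.range b).map (fun r : Nat => pvDecode ((k, vs) :: rest) ((q * b + r : Nat) : Int))) := by
          apply List.flatMap_congr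
          intro q _
          rw [List.map_map]
          apply List.map_congr_left
          intro r hr
          exact (decode_step k vs rest q r b hb (List.mem_range.mp hr)).symm
      _ = ((List.range vs.length).flatMap (fun q => (List.range b).map (fun r => q * b + r))).map (fun q : Nat => pvDecode ((k, vs) :: rest) (q : Int)) := by
          rw [List.map_flatMap]
          apply List.flatMap_congr
          intro q _
          rw [List.map_map]
          rfl

-- ===== VERDICT (by name: the statement is the Claim_ definition above) =====
theorem generate_grid_combos_spec : Claim_equal_generate_grid_combos := by
  intro bpp top_n _
  unfold Spec_generate_grid_combos generate_grid_combos generate_grid_combos_alt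
  simp only []
  rw [keys_same bpp top_n]
  set keys := PySem.List.sorted (PySem.Dict.keys (bpp.foldl (fun d p => PySem.Dict.insert d p.1 p.2) PySem.Dict.empty)) (fun k => k) false with hkeys
  set pairs := keys.map (fun k => (k, PySem.List.slice (PySem.Dict.getD (bpp.foldl (fun d p => PySem.Dict.insert d p.1 p.2) PySem.Dict.empty) k []) none (some top_n))) with hpairs
  have hfst : pairs.map Prod.fst = keys := by
    rw [hpairs, List.map_map]
    exact (List.map_congr_left (fun k _ => rfl)).trans (List.map_id keys)
  have hsnd : pairs.map Prod.snd = keys.map (fun k => PySem.Dict.getD (bpp.foldl (fun d p => PySem.Dict.insert d p.1 (PySem.List.slice p.2 none (some top_n))) PySem.Dict.empty) k []) := by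
    rw [hpairs, List.map_map]
    apply List.map_congr_left
    intro k _
    exact (getD_rel bpp top_n k).symm
  have hrange : PySem.List.pyRange 0 (pvNumCombos pairs) 1 = (List.range (pvNumCombos pairs).toNat).map (fun q : Nat => (q : Int)) := by
    rw [PySem.List.pyRange_one]
    simp
  rw [hrange, List.map_map, ← hsnd, ← hfst]
  exact (core pairs).trans (by apply List.map_congr_left; intro q _; rfl)
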